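-- pv_equiv track=rewrite | github.com/terrencepreilly/darglint | bin/bnf_to_cnf/bnf_to_cnf/translator.py | to_symbol
-- ===== SOURCE A (Python) =====
-- def to_symbol(value: str, count: int = None) -> str:
--     """Given a terminal value, produce an adquate symbol.
--
--     Args:
--         value: The value of the terminal.
--         count: A number to append to the terminal symbol name,
--             if non-null, otherwise nothing is added to the name.
--
--     Returns:
--         An adequate symbol name.
--
--     """
--     ret = value
--     for not_allowed, allowed in [
--         ('\\"', 'Q'),
--         ('"', ''),
--         ('*', 'A'),
--         ('.', 'P'),
--         (':', 'C'),
--         ('^', 'E'),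
--         ('(', 'LP'),
--         (')', 'RP'),
--         ('\\', 'B'),
--     ]:
--         ret = ret.replace(not_allowed, allowed)
--     return ret + (
--         str(count) if count is not None
--         else ''
--     )
-- ===== SOURCE B (Python) =====
-- _MAP = {'"': '', '*': 'A', '.': 'P', ':': 'C', '^': 'E', '(': 'LP', ')': 'RP', '\\': 'B'}
--
--
-- def to_symbol(value: str, count: int = None) -> str:
--     # Single left-to-right scan: the two-char escape '\"' becomes 'Q',
--     # every other special character is mapped through _MAP.
--     out = []
--     i = 0
--     n = len(value)
--     while i < n:
--         c = value[i]
--         if c == '\\' and i + 1 < n and value[i + 1] == '"':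
--             out.append('Q')
--             i += 2
--         else:
--             out.append(_MAP.get(c, c))
--             i += 1
--     return ''.join(out) + (str(count) if count is not None else '')
-- ===== Notes on version B (the rewrite author's own statement) =====
-- stated objective: idiomatic
-- what changed: B replaces A's nine sequential full-string replace passes with one left-to-right scan that tries the two-character backslash-quote escape first and otherwise maps each character through a dict.
import Mathlib
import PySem

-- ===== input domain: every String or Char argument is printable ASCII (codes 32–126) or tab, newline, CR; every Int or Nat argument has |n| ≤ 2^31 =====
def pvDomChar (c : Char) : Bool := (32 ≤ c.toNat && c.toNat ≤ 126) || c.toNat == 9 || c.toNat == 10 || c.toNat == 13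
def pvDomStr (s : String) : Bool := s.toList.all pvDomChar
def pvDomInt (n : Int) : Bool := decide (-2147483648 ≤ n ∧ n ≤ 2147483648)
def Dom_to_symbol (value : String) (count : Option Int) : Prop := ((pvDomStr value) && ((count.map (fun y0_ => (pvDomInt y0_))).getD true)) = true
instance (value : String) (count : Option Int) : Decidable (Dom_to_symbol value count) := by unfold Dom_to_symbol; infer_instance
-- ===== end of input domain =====

-- B replaces A's nine sequential str.replace passes with one left-to-right scan
-- over the string (objective: simpler/idiomatic single pass; same result).

-- ===== PORT A =====
-- Literal port of A: fold the nine (not_allowed, allowed) replacement pairs over the string.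
def to_symbol (value : String) (count : Option Int) : String :=
  ([("\\\"", "Q"), ("\"", ""), ("*", "A"), (".", "P"), (":", "C"),
    ("^", "E"), ("(", "LP"), (")", "RP"), ("\\", "B")].foldl
      (fun ret p => PySem.Str.replace ret p.1 p.2) value) ++
  (match count with
   | some n => PySem.Int.toStr n
   | none => "")

-- ===== PORT B =====
-- B's per-character map _MAP.get(c, c) (a miss keeps the character).
def mapChar (c : Char) : List Char :=
  if c = '"' then []
  else if c = '*' then ['A']
  else if c = '.' then ['P']
  else if c = ':' then ['C']
  else if c = '^' then ['E']
  else if c = '(' then ['L', 'P']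
  else if c = ')' then ['R', 'P']
  else if c = '\\' then ['B']
  else [c]

-- B's while loop: look ahead one char for the '\"' escape, else map the char.
def scanChars : List Char → List Char
  | [] => []
  | [c] => mapChar c
  | c :: d :: t =>
    if c = '\\' && d = '"' then 'Q' :: scanChars t
    else mapChar c ++ scanChars (d :: t)

def to_symbol_alt (value : String) (count : Option Int) : String :=
  String.ofList (scanChars value.toList) ++
    (match count with
     | some n => PySem.Int.toStr n
     | none => "")

-- ===== PRECONDITION & SPEC =====
def Spec_to_symbol (value : String) (count : Option Int) (out : String) : Prop := out = to_symbol_alt value count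
instance (value : String) (count : Option Int) (out : String) : Decidable (Spec_to_symbol value count out) := by unfold Spec_to_symbol; infer_instance

-- ===== CLAIM (what is proved, stated in full; the proofs are below) =====
def Claim_equal_to_symbol : Prop := ∀ (value : String) (count : Option Int), Dom_to_symbol value count → Spec_to_symbol value count (to_symbol value count)

-- ===== LEMMAS AND PROOFS =====

-- single-character substitution, as performed by replace with a 1-char pattern
def fsub (p : Char) (n : List Char) (c : Char) : List Char :=
  if c = p then n else [c]

-- result of A's first pass: '\"' → 'Q', everything else kept
def pairRep : List Char → List Char
  | [] => []
  | [c] => [c]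
  | c :: d :: t =>
    if c = '\\' && d = '"' then 'Q' :: pairRep t
    else c :: pairRep (d :: t)

theorem go_nil (old new : List Char) (fuel : Nat) (acc : List Char) :
    PySem.Chars.replace.go old new fuel [] acc = acc.reverse := by
  cases fuel <;> simp [PySem.Chars.replace.go]

theorem go_cons (old new : List Char) (f : Nat) (c : Char) (t acc : List Char) :
    PySem.Chars.replace.go old new (f + 1) (c :: t) acc =
      if old.isPrefixOf (c :: t) then
        PySem.Chars.replace.go old new f (List.drop old.length (c :: t)) (new.reverse ++ acc)
      else PySem.Chars.replace.go old new f t (c :: acc) := rfl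

theorem go_single (p : Char) (n : List Char) :
    ∀ (l : List Char) (fuel : Nat) (acc : List Char), l.length ≤ fuel →
      PySem.Chars.replace.go [p] n fuel l acc = acc.reverse ++ l.flatMap (fsub p n) := by
  intro l
  induction l with
  | nil => intro fuel acc _; simp [go_nil]
  | cons c t ih =>
    intro fuel acc h
    cases fuel with
    | zero => simp at h
    | succ f =>
      rw [go_cons]
      by_cases hc : c = p
      · subst hc
        rw [if_pos (by simp [List.isPrefixOf])]
        rw [show List.drop [c].length (c :: t) = t from rfl]
        rw [ih f (n.reverse ++ acc) (by simp only [List.length_cons] at h; omega)]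
        simp [fsub]
      · rw [if_neg (by intro hpre; simp [List.isPrefixOf] at hpre; exact hc hpre.symm)]
        rw [ih f (c :: acc) (by simp only [List.length_cons] at h; omega)]
        simp [fsub, hc]

theorem go_pair :
    ∀ (l : List Char) (fuel : Nat) (acc : List Char), l.length ≤ fuel →
      PySem.Chars.replace.go ['\\', '"'] ['Q'] fuel l acc = acc.reverse ++ pairRep l := by
  intro l
  induction l using pairRep.induct with
  | case1 => intro fuel acc _; simp [go_nil, pairRep]
  | case2 c =>
    intro fuel acc h
    cases fuel with
    | zero => simp at h
    | succ f =>
      rw [go_cons, if_neg (by simp [List.isPrefixOf])]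
      simp [go_nil, pairRep]
  | case3 c d t hmatch ih =>
    intro fuel acc h
    simp only [Bool.and_eq_true, decide_eq_true_eq] at hmatch
    obtain ⟨hc, hd⟩ := hmatch
    subst hc; subst hd
    cases fuel with
    | zero => simp at h
    | succ f =>
      rw [go_cons, if_pos (by simp [List.isPrefixOf])]
      rw [show List.drop (['\\', '"'] : List Char).length ('\\' :: '"' :: t) = t from rfl]
      rw [ih f (['Q'].reverse ++ acc) (by simp only [List.length_cons] at h ⊢; omega)]
      simp [pairRep]
  | case4 c d t hmatch ih =>
    intro fuel acc h
    cases fuel with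
    | zero => simp at h
    | succ f =>
      rw [go_cons, if_neg (by
        intro hpre
        simp [List.isPrefixOf] at hpre
        exact hmatch (by simp [hpre.1.symm, hpre.2.symm]))]
      rw [ih f (c :: acc) (by simp only [List.length_cons] at h ⊢; omega)]
      have hpr : pairRep (c :: d :: t) = c :: pairRep (d :: t) := by
        simp only [pairRep]; rw [if_neg hmatch]
      simp [hpr]

theorem rep_single (s : List Char) (p : Char) (n : List Char) :
    PySem.Chars.replace s [p] n = s.flatMap (fsub p n) := by
  simp [PySem.Chars.replace, go_single p n s s.length [] (le_refl _)]

theorem rep_pair (s : List Char) :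
    PySem.Chars.replace s ['\\', '"'] ['Q'] = pairRep s := by
  simp [PySem.Chars.replace, go_pair s s.length [] (le_refl _)]

-- the eight single-character passes compose into B's per-char map
theorem chain_map (c : Char) :
    List.flatMap
      (fun x1 => List.flatMap
        (fun x2 => List.flatMap
          (fun x3 => List.flatMap
            (fun x4 => List.flatMap
              (fun x5 => List.flatMap
                (fun x6 => List.flatMap (fsub '\\' ['B']) (fsub ')' ['R', 'P'] x6))
                (fsub '(' ['L', 'P'] x5))
              (fsub '^' ['E'] x4))
            (fsub ':' ['C'] x3))
          (fsub '.' ['P'] x2))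
        (fsub '*' ['A'] x1))
      (fsub '"' [] c) = mapChar c := by
  by_cases h1 : c = '"'; · subst h1; decide
  by_cases h2 : c = '*'; · subst h2; decide
  by_cases h3 : c = '.'; · subst h3; decide
  by_cases h4 : c = ':'; · subst h4; decide
  by_cases h5 : c = '^'; · subst h5; decide
  by_cases h6 : c = '('; · subst h6; decide
  by_cases h7 : c = ')'; · subst h7; decide
  by_cases h8 : c = '\\'; · subst h8; decide
  simp [fsub, mapChar, h1, h2, h3, h4, h5, h6, h7, h8]

theorem flat_scan (s : List Char) :
    (pairRep s).flatMap mapChar = scanChars s := by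
  induction s using pairRep.induct with
  | case1 => simp [pairRep, scanChars]
  | case2 c => simp [pairRep, scanChars]
  | case3 c d t hmatch ih =>
    simp only [pairRep, scanChars, if_pos hmatch, List.flatMap_cons, ih]
    have : mapChar 'Q' = ['Q'] := by decide
    simp [this]
  | case4 c d t hmatch ih =>
    simp [pairRep, scanChars, hmatch, ih]

set_option maxHeartbeats 1000000 in
theorem chars_eq (s : List Char) :
    ((((((((PySem.Chars.replace s ['\\', '"'] ['Q']).flatMap (fsub '"' [])).flatMap
      (fsub '*' ['A'])).flatMap (fsub '.' ['P'])).flatMap (fsub ':' ['C'])).flatMap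
      (fsub '^' ['E'])).flatMap (fsub '(' ['L', 'P'])).flatMap (fsub ')' ['R', 'P'])).flatMap
      (fsub '\\' ['B']) = scanChars s := by
  rw [rep_pair, ← flat_scan]
  simp only [List.flatMap_assoc]
  exact List.flatMap_congr (fun c _ => chain_map c)

-- ===== VERDICT (by name: the statement is the Claim_ definition above) =====
set_option maxHeartbeats 1000000 in
theorem to_symbol_spec : Claim_equal_to_symbol := by
  intro value count _
  unfold Spec_to_symbol to_symbol to_symbol_alt
  simp only [List.foldl]
  have key :
      PySem.Str.replace (PySem.Str.replace (PySem.Str.replace (PySem.Str.replace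
        (PySem.Str.replace (PySem.Str.replace (PySem.Str.replace (PySem.Str.replace
          (PySem.Str.replace value "\\\"" "Q") "\"" "") "*" "A") "." "P") ":" "C")
          "^" "E") "(" "LP") ")" "RP") "\\" "B"
        = String.ofList (scanChars value.toList) := by
    simp only [PySem.Str.replace, String.toList_ofList]
    apply congrArg String.ofList
    rw [show ("\\\"" : String).toList = ['\\', '"'] by decide,
        show ("Q" : String).toList = ['Q'] by decide,
        show ("\"" : String).toList = ['"'] by decide,
        show ("" : String).toList = [] by decide,
        show ("*" : String).toList = ['*'] by decide,
        show ("A" : String).toList = ['A'] by decide,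
        show ("." : String).toList = ['.'] by decide,
        show ("P" : String).toList = ['P'] by decide,
        show (":" : String).toList = [':'] by decide,
        show ("C" : String).toList = ['C'] by decide,
        show ("^" : String).toList = ['^'] by decide,
        show ("E" : String).toList = ['E'] by decide,
        show ("(" : String).toList = ['(' ] by decide,
        show ("LP" : String).toList = ['L', 'P'] by decide,
        show (")" : String).toList = [')' ] by decide,
        show ("RP" : String).toList = ['R', 'P'] by decide,
        show ("\\" : String).toList = ['\\'] by decide,
        show ("B" : String).toList = ['B'] by decide]
    rw [← chars_eq value.toList]
    simp only [rep_single]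
  rw [key]
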